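-- pv_equiv track=rewrite | github.com/KDigitalAi/Assessments | scripts/generate_all_assessments.py | detect_course_name
-- ===== SOURCE A (Python) =====
-- from typing import List, Dict, Any, Optional, Tuple
--
-- def detect_course_name(pdf_title: Optional[str] = None, pdf_id: str = "") -> str:
--     """
--     Detect course name from PDF title or PDF ID
--
--     Args:
--         pdf_title: PDF title from pdf_embeddings table
--         pdf_id: PDF ID as fallback
--
--     Returns:
--         Course name (Python, DevOps, etc.)
--     """
--     # Combine title and ID for detection
--     search_text = ""
--     if pdf_title:
--         search_text = pdf_title.lower()
--     if pdf_id: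
--         search_text += " " + pdf_id.lower()
--
--     search_text = search_text.strip()
--
--     # Detection rules - CHECK DEVOPS FIRST (more specific indicators)
--     # DevOps course indicators (check first to avoid false positives)
--     devops_indicators = [
--         "devops", "docker", "kubernetes", "k8s", "jenkins",
--         "sonarqube", "linux", "git", "ci/cd", "terraform",
--         "ansible", "aws", "azure", "gcp", "networking", "cloud",
--         "container", "orchestration", "deployment", "infrastructure"
--     ]
--
--     # Python course indicators (more specific to avoid conflicts)
--     python_indicators = [
--         "python", "datatypes", "loops", "functions", "classes",
--         "list", "dict", "tuple", "set", "comprehension", "decorator",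
--         "generator", "iterator", "exception", "import", "package"
--     ]
--
--     # Check for DevOps FIRST (more specific indicators take priority)
--     if any(indicator in search_text for indicator in devops_indicators):
--         return "DevOps"
--
--     # Check for Python (only if no DevOps indicators found)
--     if any(indicator in search_text for indicator in python_indicators):
--         return "Python"
--
--     # Check for module patterns - need context to determine course
--     # If it contains DevOps-related terms, it's DevOps
--     if "module" in search_text:
--         # Check if it's a DevOps module by looking for DevOps keywords
--         devops_module_keywords = ["docker", "kubernetes", "sonarqube", "networking",
--                                  "cloud", "devops", "linux", "jenkins", "terraform"]
--         if any(keyword in search_text for keyword in devops_module_keywords):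
--             return "DevOps"
--         # Otherwise, assume Python for backward compatibility
--         return "Python"
--
--     # Default to Python if no match (for backward compatibility)
--     return "Python"
-- ===== SOURCE B (Python) =====
-- DEVOPS_KEYWORDS = [
--     "devops", "docker", "kubernetes", "k8s", "jenkins",
--     "sonarqube", "linux", "git", "ci/cd", "terraform",
--     "ansible", "aws", "azure", "gcp", "networking", "cloud",
--     "container", "orchestration", "deployment", "infrastructure",
-- ]
--
-- # Index the keywords once by their first character, so the text is scanned
-- # left to right and at each position only the (few) keywords starting with
-- # that character are tested with startswith.
-- _BY_FIRST = {}
-- for _k in DEVOPS_KEYWORDS: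
--     _BY_FIRST.setdefault(_k[0], []).append(_k)
--
--
-- def detect_course_name(pdf_title=None, pdf_id: str = "") -> str:
--     # A's python-indicator and "module" branches are dead code: every path
--     # after the DevOps check returns "Python" (the module keywords are a
--     # subset of the DevOps indicators), so one DevOps scan decides.
--     parts = []
--     if pdf_title:
--         parts.append(pdf_title.lower())
--     if pdf_id:
--         parts.append(pdf_id.lower())
--     text = " ".join(parts).strip()
--     for i in range(len(text)):
--         for k in _BY_FIRST.get(text[i], ()):
--             if text.startswith(k, i):
--                 return "DevOps"
--     return "Python"
-- ===== Notes on version B (the rewrite author's own statement) =====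
-- stated objective: alternative
-- what changed: B replaces A's three sequential keyword-list membership scans with a single left-to-right scan of the text driven by a dict indexing the DevOps keywords by first character, testing at each position only that character's bucket with startswith; the python-indicator and module branches of A are dead code (every path after the DevOps check yields the same default label), so B drops them and trades the built-in substring test for an explicit position-by-position matcher.
import Mathlib
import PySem

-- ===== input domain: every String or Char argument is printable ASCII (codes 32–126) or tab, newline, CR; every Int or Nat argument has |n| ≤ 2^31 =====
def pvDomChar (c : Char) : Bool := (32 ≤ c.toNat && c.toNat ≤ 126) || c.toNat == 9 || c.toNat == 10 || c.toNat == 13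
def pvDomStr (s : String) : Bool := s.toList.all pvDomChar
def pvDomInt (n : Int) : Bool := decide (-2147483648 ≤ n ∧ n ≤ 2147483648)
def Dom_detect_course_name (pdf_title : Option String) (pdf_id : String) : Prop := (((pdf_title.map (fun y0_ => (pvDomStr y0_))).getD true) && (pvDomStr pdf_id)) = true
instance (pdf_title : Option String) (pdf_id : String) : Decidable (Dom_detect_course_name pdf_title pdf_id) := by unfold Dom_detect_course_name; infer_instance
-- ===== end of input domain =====

-- B indexes the DevOps keywords by first character and scans the text once, testing at each
-- position only that character's bucket; A's python-indicator and 'module' branches are dead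
-- code (every path after the DevOps check returns "Python"), so B drops them. Objective: alternative.

-- ===== PORT A =====
def devops_indicators : List String :=
  ["devops", "docker", "kubernetes", "k8s", "jenkins",
   "sonarqube", "linux", "git", "ci/cd", "terraform",
   "ansible", "aws", "azure", "gcp", "networking", "cloud",
   "container", "orchestration", "deployment", "infrastructure"]

def python_indicators : List String :=
  ["python", "datatypes", "loops", "functions", "classes",
   "list", "dict", "tuple", "set", "comprehension", "decorator",
   "generator", "iterator", "exception", "import", "package"]

def devops_module_keywords : List String :=
  ["docker", "kubernetes", "sonarqube", "networking",
   "cloud", "devops", "linux", "jenkins", "terraform"]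

def detect_course_name (pdf_title : Option String) (pdf_id : String) : String :=
  -- search_text = "" ; if pdf_title: search_text = pdf_title.lower()
  let search_text : String :=
    match pdf_title with
    | some t => if t ≠ "" then PySem.Str.lower t else ""
    | none => ""
  -- if pdf_id: search_text += " " + pdf_id.lower()
  let search_text := if pdf_id ≠ "" then search_text ++ " " ++ PySem.Str.lower pdf_id else search_text
  -- search_text = search_text.strip()
  let search_text := PySem.Str.strip search_text
  if devops_indicators.any (fun indicator => PySem.Str.isIn indicator search_text) then "DevOps"
  else if python_indicators.any (fun indicator => PySem.Str.isIn indicator search_text) then "Python"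
  else if PySem.Str.isIn "module" search_text then
    (if devops_module_keywords.any (fun keyword => PySem.Str.isIn keyword search_text) then "DevOps"
     else "Python")
  else "Python"

-- ===== PORT B =====
-- the module-level dict _BY_FIRST built by Source B's setdefault loop, written out as the
-- resulting literal (same keys in first-occurrence order, same bucket contents in order)
def pvByFirst : PySem.Dict Char (List String) := PySem.Dict.mk
  [('d', ["devops", "docker", "deployment"]),
   ('k', ["kubernetes", "k8s"]),
   ('j', ["jenkins"]),
   ('s', ["sonarqube"]),
   ('l', ["linux"]),
   ('g', ["git", "gcp"]),
   ('c', ["ci/cd", "cloud", "container"]),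
   ('t', ["terraform"]),
   ('a', ["ansible", "aws", "azure"]),
   ('n', ["networking"]),
   ('o', ["orchestration"]),
   ('i', ["infrastructure"])]

-- the 'for i in range(len(text)) / for k in bucket / text.startswith(k, i)' scan,
-- as structural recursion over the suffixes of the text
def pvScan : List Char → String
  | [] => "Python"
  | c :: rest =>
    if (PySem.Dict.getD pvByFirst c []).any
        (fun k => PySem.Chars.startswith (c :: rest) k.toList) then "DevOps"
    else pvScan rest

def detect_course_name_alt (pdf_title : Option String) (pdf_id : String) : String :=
  let parts : List String :=
    (match pdf_title with
     | some t => if t ≠ "" then [PySem.Str.lower t] else []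
     | none => []) ++
    (if pdf_id ≠ "" then [PySem.Str.lower pdf_id] else [])
  let text := PySem.Str.strip (PySem.Str.join " " parts)
  pvScan text.toList

-- ===== PRECONDITION & SPEC =====
def Spec_detect_course_name (pdf_title : Option String) (pdf_id : String) (out : String) : Prop := out = detect_course_name_alt pdf_title pdf_id
instance (pdf_title : Option String) (pdf_id : String) (out : String) : Decidable (Spec_detect_course_name pdf_title pdf_id out) := by unfold Spec_detect_course_name; infer_instance

-- ===== CLAIM (what is proved, stated in full; the proofs are below) =====
def Claim_equal_detect_course_name : Prop := ∀ (pdf_title : Option String) (pdf_id : String), Dom_detect_course_name pdf_title pdf_id → Spec_detect_course_name pdf_title pdf_id (detect_course_name pdf_title pdf_id)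

-- ===== LEMMAS AND PROOFS =====

-- stripping a leading space changes nothing
lemma strip_space_cons (l : List Char) : PySem.Chars.strip (' ' :: l) = PySem.Chars.strip l := by
  have hsp : PySem.Chars.isspace ' ' = true := rfl
  simp [PySem.Chars.strip, PySem.Chars.lstrip, hsp]

-- the two ports build the same stripped search text
lemma search_text_eq (pdf_title : Option String) (pdf_id : String) :
    PySem.Str.strip
      ((if pdf_id ≠ "" then
          (match pdf_title with
           | some t => if t ≠ "" then PySem.Str.lower t else ""
           | none => "") ++ " " ++ PySem.Str.lower pdf_id
        else
          (match pdf_title with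
           | some t => if t ≠ "" then PySem.Str.lower t else ""
           | none => ""))) =
    PySem.Str.strip (PySem.Str.join " "
      ((match pdf_title with
        | some t => if t ≠ "" then [PySem.Str.lower t] else []
        | none => []) ++
       (if pdf_id ≠ "" then [PySem.Str.lower pdf_id] else []))) := by
  cases pdf_title with
  | none =>
      by_cases hi : pdf_id = "" <;>
        simp [hi, PySem.Str.strip, PySem.Str.join, PySem.Chars.join, List.intercalate, strip_space_cons]
  | some t =>
      by_cases ht : t = "" <;> by_cases hi : pdf_id = "" <;>
        simp [ht, hi, PySem.Str.strip, PySem.Str.join, PySem.Chars.join, List.intercalate, strip_space_cons]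

-- startswith on a cons: the first characters must agree
lemma sw_cons (c a : Char) (rest t : List Char) :
    PySem.Chars.startswith (c :: rest) (a :: t) =
      (a == c && PySem.Chars.startswith rest t) := by
  rw [Bool.eq_iff_iff]
  simp only [Bool.and_eq_true, beq_iff_eq, PySem.Chars.startswith_iff, List.cons_prefix_cons]

-- the first-character bucket tests exactly the keywords that can start here
lemma bucket_any (c : Char) (rest : List Char) :
    ((PySem.Dict.getD pvByFirst c []).any
        (fun k => PySem.Chars.startswith (c :: rest) k.toList)) =
      (devops_indicators.any (fun k => PySem.Chars.startswith (c :: rest) k.toList)) := by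
  by_cases h1 : c = 'd'; · subst h1; simp [pvByFirst, PySem.Dict.getD_eq_get?_getD, PySem.Dict.get?_mk_cons, devops_indicators, sw_cons]
  by_cases h2 : c = 'k'; · subst h2; simp [pvByFirst, PySem.Dict.getD_eq_get?_getD, PySem.Dict.get?_mk_cons, devops_indicators, sw_cons]
  by_cases h3 : c = 'j'; · subst h3; simp [pvByFirst, PySem.Dict.getD_eq_get?_getD, PySem.Dict.get?_mk_cons, devops_indicators, sw_cons]
  by_cases h4 : c = 's'; · subst h4; simp [pvByFirst, PySem.Dict.getD_eq_get?_getD, PySem.Dict.get?_mk_cons, devops_indicators, sw_cons]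
  by_cases h5 : c = 'l'; · subst h5; simp [pvByFirst, PySem.Dict.getD_eq_get?_getD, PySem.Dict.get?_mk_cons, devops_indicators, sw_cons]
  by_cases h6 : c = 'g'; · subst h6; simp [pvByFirst, PySem.Dict.getD_eq_get?_getD, PySem.Dict.get?_mk_cons, devops_indicators, sw_cons]
  by_cases h7 : c = 'c'; · subst h7; simp [pvByFirst, PySem.Dict.getD_eq_get?_getD, PySem.Dict.get?_mk_cons, devops_indicators, sw_cons]
  by_cases h8 : c = 't'; · subst h8; simp [pvByFirst, PySem.Dict.getD_eq_get?_getD, PySem.Dict.get?_mk_cons, devops_indicators, sw_cons]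
  by_cases h9 : c = 'a'; · subst h9; simp [pvByFirst, PySem.Dict.getD_eq_get?_getD, PySem.Dict.get?_mk_cons, devops_indicators, sw_cons]
  by_cases h10 : c = 'n'; · subst h10; simp [pvByFirst, PySem.Dict.getD_eq_get?_getD, PySem.Dict.get?_mk_cons, devops_indicators, sw_cons]
  by_cases h11 : c = 'o'; · subst h11; simp [pvByFirst, PySem.Dict.getD_eq_get?_getD, PySem.Dict.get?_mk_cons, devops_indicators, sw_cons]
  by_cases h12 : c = 'i'; · subst h12; simp [pvByFirst, PySem.Dict.getD_eq_get?_getD, PySem.Dict.get?_mk_cons, devops_indicators, sw_cons]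
  have e1 : ('d' == c) = false := beq_eq_false_iff_ne.mpr (Ne.symm h1)
  have e2 : ('k' == c) = false := beq_eq_false_iff_ne.mpr (Ne.symm h2)
  have e3 : ('j' == c) = false := beq_eq_false_iff_ne.mpr (Ne.symm h3)
  have e4 : ('s' == c) = false := beq_eq_false_iff_ne.mpr (Ne.symm h4)
  have e5 : ('l' == c) = false := beq_eq_false_iff_ne.mpr (Ne.symm h5)
  have e6 : ('g' == c) = false := beq_eq_false_iff_ne.mpr (Ne.symm h6)
  have e7 : ('c' == c) = false := beq_eq_false_iff_ne.mpr (Ne.symm h7)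
  have e8 : ('t' == c) = false := beq_eq_false_iff_ne.mpr (Ne.symm h8)
  have e9 : ('a' == c) = false := beq_eq_false_iff_ne.mpr (Ne.symm h9)
  have e10 : ('n' == c) = false := beq_eq_false_iff_ne.mpr (Ne.symm h10)
  have e11 : ('o' == c) = false := beq_eq_false_iff_ne.mpr (Ne.symm h11)
  have e12 : ('i' == c) = false := beq_eq_false_iff_ne.mpr (Ne.symm h12)
  simp [pvByFirst, PySem.Dict.getD_eq_get?_getD, PySem.Dict.get?,
    devops_indicators, sw_cons, e1, e2, e3, e4, e5, e6, e7, e8, e9, e10, e11, e12]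

-- a keyword occurs in c :: rest iff it starts there or occurs in rest
lemma anyIn_cons (c : Char) (rest : List Char) :
    (devops_indicators.any (fun k => PySem.Chars.isIn k.toList (c :: rest))) =
      ((devops_indicators.any (fun k => PySem.Chars.startswith (c :: rest) k.toList)) ||
       (devops_indicators.any (fun k => PySem.Chars.isIn k.toList rest))) := by
  rw [Bool.eq_iff_iff]
  simp only [List.any_eq_true, Bool.or_eq_true,
    PySem.Chars.isIn_iff_infix, PySem.Chars.startswith_iff, List.infix_cons_iff]
  constructor
  · rintro ⟨x, hx, h | h⟩
    · exact Or.inl ⟨x, hx, h⟩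
    · exact Or.inr ⟨x, hx, h⟩
  · rintro (⟨x, hx, h⟩ | ⟨x, hx, h⟩)
    · exact ⟨x, hx, Or.inl h⟩
    · exact ⟨x, hx, Or.inr h⟩

-- the bucket scan computes exactly A's DevOps membership test
lemma pvScan_eq (l : List Char) :
    pvScan l =
      (if devops_indicators.any (fun k => PySem.Chars.isIn k.toList l) then "DevOps"
       else "Python") := by
  induction l with
  | nil => simp [pvScan]; decide
  | cons c rest ih =>
      rw [pvScan, bucket_any, ih, anyIn_cons]
      by_cases h : devops_indicators.any (fun k => PySem.Chars.startswith (c :: rest) k.toList) = true <;>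
        simp [h]

-- after the DevOps check fails, every remaining branch of A returns "Python"
lemma tail_eq (s : String)
    (h : devops_indicators.any (fun indicator => PySem.Str.isIn indicator s) = false) :
    (if python_indicators.any (fun indicator => PySem.Str.isIn indicator s) then "Python"
     else if PySem.Str.isIn "module" s then
       (if devops_module_keywords.any (fun keyword => PySem.Str.isIn keyword s) then "DevOps"
        else "Python")
     else "Python") = "Python" := by
  simp [devops_indicators, List.any] at h
  obtain ⟨h1, h2, h3, _, h4, h5, h6, h7, _, h8, _, _, _, _, h9, h10, _⟩ := h
  simp [devops_module_keywords, List.any, h1, h2, h3, h4, h5, h6, h8, h9, h10]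

-- the classification parts agree on any search text
lemma classify_eq (s : String) :
    (if devops_indicators.any (fun indicator => PySem.Str.isIn indicator s) = true then "DevOps"
     else if python_indicators.any (fun indicator => PySem.Str.isIn indicator s) = true then "Python"
     else if PySem.Str.isIn "module" s = true then
       (if devops_module_keywords.any (fun keyword => PySem.Str.isIn keyword s) = true then "DevOps"
        else "Python")
     else "Python") = pvScan s.toList := by
  rw [pvScan_eq]
  have hbridge : ∀ k : String, PySem.Str.isIn k s = PySem.Chars.isIn k.toList s.toList := by
    intro k; simp [PySem.Str.isIn_eq]
  by_cases hd : devops_indicators.any (fun indicator => PySem.Str.isIn indicator s) = true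
  · have hd' : devops_indicators.any (fun k => PySem.Chars.isIn k.toList s.toList) = true := by
      simpa [hbridge] using hd
    rw [if_pos hd, if_pos hd']
  · have hd' : ¬ devops_indicators.any (fun k => PySem.Chars.isIn k.toList s.toList) = true := by
      simpa [hbridge] using hd
    rw [if_neg hd, if_neg hd', tail_eq s (eq_false_of_ne_true hd)]

-- ===== VERDICT (by name: the statement is the Claim_ definition above) =====
theorem detect_course_name_spec : Claim_equal_detect_course_name := by
  intro pdf_title pdf_id _
  unfold Spec_detect_course_name
  simp only [detect_course_name, detect_course_name_alt]
  rw [search_text_eq pdf_title pdf_id]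
  exact classify_eq _
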